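-- pv_equiv track=rewrite | github.com/LuticDenisa/Python | lab2/ex6.py | find
-- ===== SOURCE A (Python) =====
-- def find(x, lists):
--     items = []
--
--     for l in lists:
--         items.extend(l)
--
--     result = []
--     for item in items:
--         if items.count(item) == x and item not in result:
--             result.append(item)
--
--     return result
-- ===== SOURCE B (Python) =====
-- def find(x, lists):
--     items = [v for l in lists for v in l]
--     s = sorted(items)
--     wanted = set()
--     i = 0
--     while i < len(s):
--         j = i + 1
--         while j < len(s) and s[j] == s[i]:
--             j += 1
--         if j - i == x:
--             wanted.add(s[i])
--         i = j
--     result = []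
--     for v in items:
--         if v in wanted:
--             result.append(v)
--             wanted.discard(v)
--     return result
-- ===== Notes on version B (the rewrite author's own statement) =====
-- stated objective: faster
-- what changed: Replaces the flatten-then-rescan loop (items.count per element plus a linear membership dedup) with sort-then-run-scan: sort the flattened items, collect values whose run length equals x into a set, then emit each such value at its first occurrence in the original order while removing it from the set.
import Mathlib
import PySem

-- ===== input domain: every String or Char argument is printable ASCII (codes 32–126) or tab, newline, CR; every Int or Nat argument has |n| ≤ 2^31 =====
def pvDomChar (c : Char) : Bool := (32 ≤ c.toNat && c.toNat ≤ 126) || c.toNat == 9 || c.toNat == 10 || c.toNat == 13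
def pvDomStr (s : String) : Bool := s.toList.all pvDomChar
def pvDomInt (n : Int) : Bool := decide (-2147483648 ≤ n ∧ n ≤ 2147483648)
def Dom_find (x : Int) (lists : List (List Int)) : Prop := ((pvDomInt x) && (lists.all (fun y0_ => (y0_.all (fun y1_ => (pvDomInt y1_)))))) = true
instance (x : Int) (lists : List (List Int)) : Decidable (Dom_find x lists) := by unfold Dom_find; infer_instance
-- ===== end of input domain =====

-- B replaces A's flatten-then-rescan loop (items.count per element + linear dedup) with a
-- sort-then-run-scan pass collecting values of multiplicity x, emitted at first occurrence.


-- ===== PORT A =====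
def find (x : Int) (lists : List (List Int)) : List Int :=
  let items := lists.foldl (fun items l => items ++ l) []
  items.foldl (fun result item =>
    if ((PySem.List.count items item : Int) = x) ∧ item ∉ result
    then result ++ [item] else result) []

-- ===== PORT B =====
-- the outer while loop of Source B: consume one run of equal values of the sorted list per step
-- (the inner 'while j' counts the equal values following s[i], i.e. the takeWhile block)
def scanRuns (x : Int) : List Int → PySem.Set Int → PySem.Set Int
  | [], w => w
  | v :: t, w =>
      scanRuns x (t.dropWhile (· == v))
        (if ((1 + (t.takeWhile (· == v)).length : Int) = x) then PySem.Set.add w v else w)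
  termination_by s => s.length
  decreasing_by
    have := List.length_dropWhile_le (p := fun u => u == v) (l := t)
    simp; omega

-- the final for loop of Source B: append v on first hit, then discard it from the set
def emitFirst : List Int → PySem.Set Int → List Int → List Int
  | [], _, result => result
  | v :: t, w, result =>
      if v ∈ w then emitFirst t (PySem.Set.discard w v) (result ++ [v])
      else emitFirst t w result

def find_alt (x : Int) (lists : List (List Int)) : List Int :=
  let items := lists.flatMap (fun l => l)
  let s := PySem.List.sorted items (fun v => v) false
  let wanted := scanRuns x s PySem.Set.empty
  emitFirst items wanted []

-- ===== PRECONDITION & SPEC =====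
def Spec_find (x : Int) (lists : List (List Int)) (out : List Int) : Prop := out = find_alt x lists
instance (x : Int) (lists : List (List Int)) (out : List Int) : Decidable (Spec_find x lists out) := by unfold Spec_find; infer_instance

-- ===== CLAIM (what is proved, stated in full; the proofs are below) =====
def Claim_equal_find : Prop := ∀ (x : Int) (lists : List (List Int)), Dom_find x lists → Spec_find x lists (find x lists)

-- ===== LEMMAS AND PROOFS =====

/-- A's flattening loop is `List.flatten`. -/
lemma foldl_append_eq_flatten (ls : List (List Int)) (acc : List Int) :
    ls.foldl (fun items l => items ++ l) acc = acc ++ ls.flatten := by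
  induction ls generalizing acc with
  | nil => simp
  | cons l t ih => simp [List.foldl, ih, List.append_assoc]

/-- A's dedup-and-filter loop keeps, in first-occurrence order, the elements satisfying `P`
    that are not already in the accumulator. -/
lemma loopA (P : Int → Prop) [DecidablePred P] (l : List Int) : ∀ (r : List Int),
    l.foldl (fun result item => if P item ∧ item ∉ result then result ++ [item] else result) r
      = r ++ (PySem.Set.ofList l).filter (fun i => decide (P i) && decide (i ∉ r)) := by
  induction l with
  | nil => intro r; simp
  | cons i t ih =>
    intro r
    by_cases h : P i ∧ i ∉ r
    · simp only [List.foldl, if_pos h, ih (r ++ [i]), PySem.Set.ofList_cons]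
      rw [show PySem.Set.discard (PySem.Set.ofList t) i
            = (PySem.Set.ofList t).filter (fun y => y != i) from rfl]
      simp only [List.filter_cons, List.filter_filter]
      have hd : (decide (P i) && decide (i ∉ r)) = true := by
        simp [h.1, h.2]
      rw [hd]
      simp only [if_true, List.append_assoc, List.singleton_append]
      apply congrArg; apply congrArg
      apply List.filter_congr
      intro a _
      by_cases ha : a = i
      · simp [ha]
      · simp [ha, List.mem_append]
    · simp only [List.foldl, if_neg h, ih r, PySem.Set.ofList_cons]
      rw [show PySem.Set.discard (PySem.Set.ofList t) i
            = (PySem.Set.ofList t).filter (fun y => y != i) from rfl]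
      simp only [List.filter_cons, List.filter_filter]
      have hd : (decide (P i) && decide (i ∉ r)) = false := by
        by_cases hp : P i
        · have : i ∈ r := by by_contra hc; exact h ⟨hp, hc⟩
          simp [this]
        · simp [hp]
      rw [hd]
      apply congrArg
      apply List.filter_congr
      intro a _
      by_cases ha : a = i
      · subst ha; rw [Bool.eq_iff_iff]; simp; tauto
      · simp [ha]

/-- Both sides reduce to this canonical value. -/
def canon (x : Int) (items : List Int) : List Int :=
  (PySem.Set.ofList items).filter (fun i => decide ((items.count i : Int) = x))

lemma find_eq_canon (x : Int) (lists : List (List Int)) :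
    find x lists = canon x lists.flatten := by
  unfold find canon
  simp only [foldl_append_eq_flatten, List.nil_append]
  rw [loopA (fun item => (PySem.List.count lists.flatten item : Int) = x) lists.flatten []]
  simp only [List.not_mem_nil, not_false_iff, decide_true, Bool.and_true, List.nil_append]
  apply List.filter_congr
  intro a _
  rw [decide_eq_decide]
  simp [PySem.List.count_eq]

/-- Membership in the run-scan result: an element is added exactly when its multiplicity
    in the (sorted) scanned list is `x`. -/
lemma scan_mem (x : Int) : ∀ (n : Nat) (s : List Int), s.length ≤ n →
    s.Pairwise (· ≤ ·) → ∀ (w : PySem.Set Int) (a : Int),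
    a ∈ scanRuns x s w ↔ a ∈ w ∨ (a ∈ s ∧ (s.count a : Int) = x) := by
  intro n
  induction n with
  | zero =>
    intro s hs _ w a
    have hnil : s = [] := List.length_eq_zero_iff.1 (Nat.le_zero.1 hs)
    subst hnil; simp [scanRuns]
  | succ n ih =>
    intro s hs hsort w a
    match s with
    | [] => simp [scanRuns]
    | v :: t =>
      have hvle : ∀ y ∈ t, v ≤ y := fun y hy => (List.pairwise_cons.1 hsort).1 y hy
      have htp : t.Pairwise (· ≤ ·) := (List.pairwise_cons.1 hsort).2
      set run := t.takeWhile (· == v) with hrun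
      set rest := t.dropWhile (· == v) with hrest
      clear_value run rest
      have htrr : t = run ++ rest := by
        rw [hrun, hrest]; exact (List.takeWhile_append_dropWhile).symm
      have hrunv : ∀ y ∈ run, y = v := by
        intro y hy
        rw [hrun] at hy
        simpa using List.mem_takeWhile_imp hy
      have hrestne : ∀ y ∈ rest, y ≠ v := by
        intro y hy
        obtain ⟨h, r, hre⟩ : ∃ h r, rest = h :: r := by
          cases hrc : rest with
          | nil => rw [hrc] at hy; simp at hy
          | cons h r => exact ⟨h, r, rfl⟩
        have hdw : List.dropWhile (· == v) t = h :: r := by rw [← hrest, hre]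
        have hhne : h ≠ v := by
          have h0 := List.dropWhile_get_zero_not (p := (· == v)) t (by rw [hdw]; simp)
          simp [hdw] at h0; exact h0
        have hhmem : h ∈ t := by rw [htrr, hre]; simp
        have hvh : v < h := lt_of_le_of_ne (hvle h hhmem) (Ne.symm hhne)
        have hrp : rest.Pairwise (· ≤ ·) := by
          rw [hrest]; exact htp.sublist (List.dropWhile_sublist _)
        rw [hre] at hy
        rcases List.mem_cons.1 hy with rfl | hy'
        · exact hhne
        · have : h ≤ y := by
            rw [hre] at hrp
            exact (List.pairwise_cons.1 hrp).1 y hy'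
          exact ne_of_gt (lt_of_lt_of_le hvh this)
      have hcrun : ∀ b, run.count b = if b = v then run.length else 0 := by
        intro b
        by_cases hb : b = v
        · subst hb
          rw [List.count_eq_length.2 (fun y hy => (hrunv y hy).symm)]
          simp
        · rw [if_neg hb, List.count_eq_zero]
          intro hmem; exact hb (hrunv b hmem)
      have hrestp : rest.Pairwise (· ≤ ·) := by
        rw [hrest]; exact htp.sublist (List.dropWhile_sublist _)
      have hrlen : rest.length ≤ n := by
        have h1 : run.length + rest.length = t.length := by
          rw [htrr]; simp
        simp at hs; omega
      rw [scanRuns, ← hrun, ← hrest, ih rest hrlen hrestp]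
      by_cases hav : a = v
      · subst hav
        have har : a ∉ rest := fun h => (hrestne a h) rfl
        have h1 : t.count a = run.length := by
          rw [htrr, List.count_append, hcrun a, if_pos rfl, List.count_eq_zero.2 har]
          omega
        have hcount : ((a :: t).count a : Int) = 1 + run.length := by
          rw [List.count_cons_self, h1]; push_cast; ring
        constructor
        · rintro (hw | ⟨hm, _⟩)
          · split_ifs at hw with hx
            · rw [PySem.Set.mem_add _ _ _] at hw
              rcases hw with hw | _
              · exact Or.inl hw
              · exact Or.inr ⟨List.mem_cons_self, by rw [hcount]; omega⟩
            · exact Or.inl hw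
          · exact absurd hm har
        · rintro (hw | ⟨_, hc⟩)
          · left; split_ifs with hx
            · exact (PySem.Set.mem_add _ _ _).2 (Or.inl hw)
            · exact hw
          · rw [hcount] at hc
            left; rw [if_pos (by omega)]
            exact (PySem.Set.mem_add _ _ _).2 (Or.inr rfl)
      · have hmem : a ∈ v :: t ↔ a ∈ rest := by
          rw [htrr]
          simp only [List.mem_cons, List.mem_append]
          constructor
          · rintro (rfl | hr | hr)
            · exact absurd rfl hav
            · exact absurd (hrunv a hr) hav
            · exact hr
          · exact fun h => Or.inr (Or.inr h)
        have hcount : (v :: t).count a = rest.count a := by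
          rw [htrr]
          simp [List.count_cons, List.count_append, hcrun a, hav]
          exact fun h => hav h.symm
        have hw' : a ∈ (if ((1 + (run.length : Int)) = x) then PySem.Set.add w v else w)
            ↔ a ∈ w := by
          split_ifs with hx
          · rw [PySem.Set.mem_add _ _ _]
            simp [hav]
          · exact Iff.rfl
        rw [hw', hmem, hcount]

lemma find_alt_eq_canon (x : Int) (lists : List (List Int)) :
    find_alt x lists = canon x lists.flatten := by
  unfold find_alt canon
  have hitems : lists.flatMap (fun l => l) = lists.flatten := by simp
  rw [hitems]
  set items := lists.flatten with hi
  set srt := PySem.List.sorted items (fun v => v) false with hsrt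
  have hperm : srt.Perm items := PySem.List.sorted_perm items (fun v => v) false
  have hsorted : srt.Pairwise (· ≤ ·) := by
    have := PySem.List.sorted_pairwise items (fun v => v)
    simpa using this
  have hwmem : ∀ a, a ∈ scanRuns x srt PySem.Set.empty
      ↔ a ∈ items ∧ (items.count a : Int) = x := by
    intro a
    rw [scan_mem x srt.length srt le_rfl hsorted]
    rw [hperm.mem_iff, hperm.count_eq]
    simp [PySem.Set.empty]
  -- the emit loop produces the first occurrences of the wanted values, in order
  have hemit : ∀ (l : List Int) (w : PySem.Set Int) (r : List Int),
      emitFirst l w r = r ++ (PySem.Set.ofList l).filter (fun v => decide (v ∈ w)) := by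
    intro l
    induction l with
    | nil => intro w r; simp [emitFirst]
    | cons v t ih =>
      intro w r
      rw [emitFirst]
      rw [show (PySem.Set.ofList (v :: t) : List Int)
            = v :: (PySem.Set.ofList t).filter (fun y => y != v) from
          by rw [PySem.Set.ofList_cons]; rfl]
      simp only [List.filter_cons, List.filter_filter]
      by_cases hv : v ∈ w
      · rw [if_pos hv, ih]
        rw [show (PySem.Set.discard w v : List Int) = w.filter (fun y => y != v) from rfl]
        simp only [hv, decide_true, if_true, List.append_assoc,
          List.singleton_append]
        apply congrArg; apply congrArg
        apply List.filter_congr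
        intro a _
        by_cases ha : a = v
        · simp [ha]
        · simp only [Bool.and_comm]
          rw [Bool.eq_iff_iff]
          simp [List.mem_filter, ha]
      · rw [if_neg hv, ih]
        simp only [hv, decide_false]
        apply congrArg
        apply List.filter_congr
        intro a _
        by_cases ha : a = v
        · simp [ha, hv]
        · simp [ha]
  rw [hemit]
  simp only [List.nil_append]
  apply List.filter_congr
  intro a ha
  have hai : a ∈ items := by rw [← PySem.Set.mem_ofList]; exact ha
  rw [Bool.eq_iff_iff]
  simp only [decide_eq_true_eq]
  rw [hwmem a]
  constructor
  · exact fun h => h.2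
  · exact fun h => ⟨hai, h⟩

-- ===== VERDICT (by name: the statement is the Claim_ definition above) =====
theorem find_spec : Claim_equal_find := by
  intro x lists _
  unfold Spec_find
  rw [find_eq_canon, find_alt_eq_canon]
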